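-- pv_equiv track=rewrite | github.com/kaiwensun/leetcode | 1001-1500/1340.Jump Game V.py | maxJumps
-- ===== SOURCE A (Python) =====
-- from typing import List
--
-- import functools
--
-- def maxJumps(arr: List[int], d: int) -> int:
--
--     @functools.lru_cache(None)
--     def jump(index):
--         res = 0
--         for direction in [-1, 1]:
--             for x in range(1, d + 1):
--                 j = index + x * direction
--                 if 0 <= j < len(arr) and arr[j] < arr[index]:
--                     res = max(res, jump(j))
--                 else:
--                     break
--         return res + 1
--     return max(jump(index) for index in range(len(arr)))
-- ===== SOURCE B (Python) =====
-- from typing import List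
--
-- import functools
--
--
-- def _lower_run(arr, i, d, step):
--     # consecutive neighbours of i in one direction (at most d of them, in
--     # bounds) whose values are strictly below arr[i]
--     run = []
--     j = i + step
--     while len(run) < d and 0 <= j < len(arr) and arr[j] < arr[i]:
--         run.append(j)
--         j += step
--     return run
--
--
-- def maxJumps(arr: List[int], d: int) -> int:
--     # Bottom-up DP: visiting indices by ascending value, every index reachable
--     # from i (strictly smaller value) already carries its final chain length,
--     # so dp[i] is 1 + the best over the two candidate runs around i.
--     n = len(arr)
--     dp = [1] * n
--     for i in sorted(range(n), key=lambda k: arr[k]):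
--         cand = _lower_run(arr, i, d, -1) + _lower_run(arr, i, d, 1)
--         dp[i] = 1 + functools.reduce(lambda b, j: max(b, dp[j]), cand, 0)
--     return max(dp)
-- ===== Notes on version B (the rewrite author's own statement) =====
-- stated objective: alternative
-- what changed: Replaced the lru_cache top-down recursion with a bottom-up DP that visits indices sorted by value ascending and, per index, first materialises the two runs of strictly-lower in-range neighbours and then reduces the dp values over that candidate list.
import Mathlib
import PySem

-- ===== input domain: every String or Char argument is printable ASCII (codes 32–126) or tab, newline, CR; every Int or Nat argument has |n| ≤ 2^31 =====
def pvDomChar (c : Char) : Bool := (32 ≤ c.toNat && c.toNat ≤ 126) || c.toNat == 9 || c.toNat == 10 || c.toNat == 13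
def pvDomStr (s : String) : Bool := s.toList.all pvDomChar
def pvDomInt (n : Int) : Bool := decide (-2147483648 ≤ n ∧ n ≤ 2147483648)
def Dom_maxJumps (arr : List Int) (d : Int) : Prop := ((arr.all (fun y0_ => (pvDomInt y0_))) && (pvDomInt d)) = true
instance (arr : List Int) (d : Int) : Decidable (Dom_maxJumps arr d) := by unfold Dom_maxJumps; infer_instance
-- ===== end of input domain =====

-- B replaces A's memoized top-down recursion by a bottom-up DP over indices sorted by value,
-- which per index first builds the two candidate runs and then reduces dp over them
-- (alternative algorithm, similar cost); equivalence of RETURN values on non-empty arr.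

-- ===== PORT A =====
-- A's inner loop 'for x in range(1, d+1): j = index + x*direction; if in-bounds and
-- arr[j] < arr[index]: res = max(res, jump(j)) else: break'.
-- The Nat fuel is d.toNat = len(range(1, d+1)), exactly the iterations Python's range offers.
def scanDir (arr : List Int) (call : Int → Int) (i dir d : Int) : Nat → Int → Int → Int
  | 0, _, res => res
  | fuel + 1, x, res =>
      let j := i + x * dir
      if 0 ≤ j ∧ j < (arr.length : Int) ∧ PySem.List.pyGetD arr j 0 < PySem.List.pyGetD arr i 0
      then scanDir arr call i dir d fuel (x + 1) (max res (call j))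
      else res

-- jump(index) of A; the fuel (arr.length at top level) only makes the lru_cache recursion total —
-- it never runs out on valid indices (chains of strictly decreasing values are shorter than arr.length).
def jumpA (arr : List Int) (d : Int) : Nat → Int → Int
  | 0, _ => 0
  | f + 1, i =>
      let r1 := scanDir arr (fun j => jumpA arr d f j) i (-1) d d.toNat 1 0
      let r2 := scanDir arr (fun j => jumpA arr d f j) i 1 d d.toNat 1 r1
      r2 + 1

def maxJumps (arr : List Int) (d : Int) : Int :=
  (PySem.List.max? ((PySem.List.pyRange 0 (arr.length : Int) 1).map
      (fun i => jumpA arr d arr.length i)) (fun y => y)).getD 0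

-- ===== PORT B =====
-- _lower_run of Source B: 'run = []; j = i + step; while len(run) < d and 0 <= j < len(arr) and
-- arr[j] < arr[i]: run.append(j); j += step'. Fuel d.toNat is the 'len(run) < d' cap;
-- the recursion builds the list front-to-back exactly as the appends do.
def lowerRun (arr : List Int) (base step : Int) : Nat → Int → List Int
  | 0, _ => []
  | cap + 1, j =>
      if 0 ≤ j ∧ j < (arr.length : Int) ∧ PySem.List.pyGetD arr j 0 < PySem.List.pyGetD arr base 0
      then j :: lowerRun arr base step cap (j + step)
      else []

def maxJumps_alt (arr : List Int) (d : Int) : Int :=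
  (PySem.List.max?
    ((PySem.List.sorted (PySem.List.pyRange 0 (arr.length : Int) 1)
        (fun k => PySem.List.pyGetD arr k 0)).foldl
      (fun dp i =>
        let cand := lowerRun arr i (-1) d.toNat (i + (-1)) ++ lowerRun arr i 1 d.toNat (i + 1)
        PySem.List.pySetD dp i
          (1 + cand.foldl (fun b j => max b (PySem.List.pyGetD dp j 0)) 0))
      (List.replicate arr.length 1))
    (fun y => y)).getD 0

-- ===== PRECONDITION & SPEC =====
-- Pre_ excludes only the empty list, on which Python's max() (A) and max(dp) (B) raise ValueError.
def Pre_maxJumps (arr : List Int) (d : Int) : Prop := arr ≠ []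
instance (arr : List Int) (d : Int) : Decidable (Pre_maxJumps arr d) := by unfold Pre_maxJumps; infer_instance
def pvWitness_maxJumps : List Int × Int := ([3, 1, 2], 1)

def Spec_maxJumps (arr : List Int) (d : Int) (out : Int) : Prop := out = maxJumps_alt arr d
instance (arr : List Int) (d : Int) (out : Int) : Decidable (Spec_maxJumps arr d out) := by unfold Spec_maxJumps; infer_instance

-- ===== CLAIM (what is proved, stated in full; the proofs are below) =====
def Claim_equal_maxJumps : Prop := ∀ (arr : List Int) (d : Int), Dom_maxJumps arr d → Pre_maxJumps arr d → Spec_maxJumps arr d (maxJumps arr d)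

-- ===== LEMMAS AND PROOFS =====

-- rank of an index: how many array values are strictly below arr[i]; recursion depth bound
def rk (arr : List Int) (i : Int) : Nat :=
  List.countP (fun v => decide (v < PySem.List.pyGetD arr i 0)) arr

-- the canonical chain length of index i
def Jv (arr : List Int) (d : Int) (i : Int) : Int := jumpA arr d (rk arr i + 1) i

theorem countP_lt_of {α : Type} (l : List α) (p q : α → Bool)
    (himp : ∀ v, p v = true → q v = true) (x : α) (hx : x ∈ l)
    (hq : q x = true) (hp : p x = false) :
    l.countP p < l.countP q := by
  induction l with
  | nil => cases hx
  | cons a t ih =>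
    rcases List.mem_cons.mp hx with rfl | hxt
    · have hle : t.countP p ≤ t.countP q := List.countP_mono_left (fun v _ h => himp v h)
      simp [hp, hq]; omega
    · have := ih hxt
      have h2 : (if p a then 1 else 0) ≤ (if q a then 1 else 0) := by
        by_cases h : p a = true
        · simp [h, himp a h]
        · simp only [Bool.not_eq_true] at h; simp [h]
      simp [List.countP_cons]; omega

theorem mem_of_valid (arr : List Int) {j : Int} (h0 : 0 ≤ j) (h1 : j < (arr.length : Int)) :
    PySem.List.pyGetD arr j 0 ∈ arr := by
  rw [PySem.List.pyGetD_eq_getElem arr 0 h0 h1]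
  exact List.getElem_mem _

theorem rk_lt (arr : List Int) {i j : Int} (hj0 : 0 ≤ j) (hj1 : j < (arr.length : Int))
    (h : PySem.List.pyGetD arr j 0 < PySem.List.pyGetD arr i 0) :
    rk arr j < rk arr i := by
  unfold rk
  exact countP_lt_of arr _ _
    (fun v hv => decide_eq_true (lt_trans (of_decide_eq_true hv) h))
    (PySem.List.pyGetD arr j 0) (mem_of_valid arr hj0 hj1)
    (decide_eq_true h) (by simp)

theorem rk_lt_len (arr : List Int) {i : Int} (h0 : 0 ≤ i) (h1 : i < (arr.length : Int)) :
    rk arr i < arr.length := by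
  have hle : rk arr i ≤ arr.length := List.countP_le_length
  rcases Nat.lt_or_ge (rk arr i) arr.length with h | h
  · exact h
  · exfalso
    have heq : rk arr i = arr.length := le_antisymm hle h
    have := (List.countP_eq_length.mp heq) _ (mem_of_valid arr h0 h1)
    simp at this

-- A's directed scan is the max-fold of 'call' over B's candidate run (same fuel)
theorem scanDir_eq_lowerRun (arr : List Int) (c : Int → Int) (i dir d : Int) :
    ∀ (fuel : Nat) (x res : Int),
      scanDir arr c i dir d fuel x res =
        (lowerRun arr i dir fuel (i + x * dir)).foldl (fun r j => max r (c j)) res := by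
  intro fuel
  induction fuel with
  | zero => intro x res; rfl
  | succ f ih =>
    intro x res
    simp only [scanDir, lowerRun]
    split
    · rw [ih (x + 1) (max res (c (i + x * dir)))]
      have : i + (x + 1) * dir = i + x * dir + dir := by ring
      rw [this]
      rfl
    · rfl

theorem mem_lowerRun (arr : List Int) (base step : Int) :
    ∀ (fuel : Nat) (j0 j : Int), j ∈ lowerRun arr base step fuel j0 →
      0 ≤ j ∧ j < (arr.length : Int) ∧
        PySem.List.pyGetD arr j 0 < PySem.List.pyGetD arr base 0 := by
  intro fuel
  induction fuel with
  | zero => intro j0 j h; cases h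
  | succ f ih =>
    intro j0 j h
    simp only [lowerRun] at h
    split at h
    · rename_i hc
      rcases List.mem_cons.mp h with rfl | h
      · exact hc
      · exact ih _ _ h
    · cases h

theorem scanDir_congr (arr : List Int) (c1 c2 : Int → Int) (i dir d : Int)
    (hc : ∀ j, 0 ≤ j → j < (arr.length : Int) →
      PySem.List.pyGetD arr j 0 < PySem.List.pyGetD arr i 0 → c1 j = c2 j) :
    ∀ (fuel : Nat) (x res : Int),
      scanDir arr c1 i dir d fuel x res = scanDir arr c2 i dir d fuel x res := by
  intro fuel
  induction fuel with
  | zero => intro x res; rfl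
  | succ f ih =>
    intro x res
    simp only [scanDir]
    split
    · rename_i h
      rw [hc (i + x * dir) h.1 h.2.1 h.2.2]
      exact ih _ _
    · rfl

theorem jumpA_fuel (arr : List Int) (d : Int) :
    ∀ (r : Nat) (i : Int) (f g : Nat), 0 ≤ i → i < (arr.length : Int) →
      rk arr i ≤ r → rk arr i < f → rk arr i < g →
      jumpA arr d f i = jumpA arr d g i := by
  intro r
  induction r with
  | zero =>
    intro i f g hi0 hi1 hr hf hg
    obtain ⟨f', rfl⟩ : ∃ f', f = f' + 1 := ⟨f - 1, by omega⟩
    obtain ⟨g', rfl⟩ : ∃ g', g = g' + 1 := ⟨g - 1, by omega⟩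
    have hc : ∀ j, 0 ≤ j → j < (arr.length : Int) →
        PySem.List.pyGetD arr j 0 < PySem.List.pyGetD arr i 0 →
        jumpA arr d f' j = jumpA arr d g' j := by
      intro j hj0 hj1 hlt
      exact absurd (rk_lt arr hj0 hj1 hlt) (by omega)
    simp only [jumpA]
    rw [scanDir_congr arr _ _ i (-1) d hc, scanDir_congr arr _ _ i 1 d hc]
  | succ r' ih =>
    intro i f g hi0 hi1 hr hf hg
    obtain ⟨f', rfl⟩ : ∃ f', f = f' + 1 := ⟨f - 1, by omega⟩
    obtain ⟨g', rfl⟩ : ∃ g', g = g' + 1 := ⟨g - 1, by omega⟩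
    have hc : ∀ j, 0 ≤ j → j < (arr.length : Int) →
        PySem.List.pyGetD arr j 0 < PySem.List.pyGetD arr i 0 →
        jumpA arr d f' j = jumpA arr d g' j := by
      intro j hj0 hj1 hlt
      have hjr := rk_lt arr hj0 hj1 hlt
      exact ih j f' g' hj0 hj1 (by omega) (by omega) (by omega)
    simp only [jumpA]
    rw [scanDir_congr arr _ _ i (-1) d hc, scanDir_congr arr _ _ i 1 d hc]

theorem jumpA_eq_Jv (arr : List Int) (d : Int) {i : Int} {f : Nat}
    (h0 : 0 ≤ i) (h1 : i < (arr.length : Int)) (hf : rk arr i < f) :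
    jumpA arr d f i = Jv arr d i :=
  jumpA_fuel arr d (rk arr i) i f (rk arr i + 1) h0 h1 (le_refl _) hf (Nat.lt_succ_self _)

theorem pyGetD_pySetD_int {xs : List Int} {i j : Int} (v dflt : Int)
    (hi0 : 0 ≤ i) (hi1 : i < (xs.length : Int)) (hj0 : 0 ≤ j) :
    PySem.List.pyGetD (PySem.List.pySetD xs i v) j dflt =
      if j = i then v else PySem.List.pyGetD xs j dflt := by
  have hi : i = ((i.toNat : Nat) : Int) := (Int.toNat_of_nonneg hi0).symm
  have hj : j = ((j.toNat : Nat) : Int) := (Int.toNat_of_nonneg hj0).symm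
  rw [hi, hj, PySem.List.pyGetD_pySetD_natCast xs i.toNat j.toNat v dflt (by omega)]
  by_cases h : j.toNat = i.toNat
  · simp [h]
  · have h2 : ¬ ((j.toNat : Int) = (i.toNat : Int)) := by exact_mod_cast h
    rw [if_neg h, if_neg h2]

-- Jv, unfolded once, as a max-fold over the two candidate runs of B
theorem Jv_eq_fold (arr : List Int) (d : Int) (i : Int) :
    Jv arr d i =
      1 + ((lowerRun arr i (-1) d.toNat (i + (-1)) ++ lowerRun arr i 1 d.toNat (i + 1)).foldl
        (fun r j => max r (jumpA arr d (rk arr i) j)) 0) := by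
  unfold Jv
  simp only [jumpA]
  rw [scanDir_eq_lowerRun, scanDir_eq_lowerRun, List.foldl_append]
  norm_num [Int.add_comm]

-- B's outer-loop body, abstracted
def stepB (arr : List Int) (d : Int) (dp : List Int) (i : Int) : List Int :=
  let cand := lowerRun arr i (-1) d.toNat (i + (-1)) ++ lowerRun arr i 1 d.toNat (i + 1)
  PySem.List.pySetD dp i
    (1 + cand.foldl (fun b j => max b (PySem.List.pyGetD dp j 0)) 0)

-- the key invariant of B's fold over the value-sorted index list
theorem foldB (arr : List Int) (d : Int) :
    ∀ (todo done : List Int) (dp : List Int),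
      (done ++ todo).Perm (PySem.List.pyRange 0 (arr.length : Int) 1) →
      todo.Pairwise (fun a b => PySem.List.pyGetD arr a 0 ≤ PySem.List.pyGetD arr b 0) →
      dp.length = arr.length →
      (∀ j ∈ done, PySem.List.pyGetD dp j 0 = Jv arr d j) →
      (todo.foldl (stepB arr d) dp).length = arr.length ∧
      (∀ j, j ∈ done ∨ j ∈ todo →
        PySem.List.pyGetD (todo.foldl (stepB arr d) dp) j 0 = Jv arr d j) := by
  intro todo
  induction todo with
  | nil =>
    intro done dp _ _ hlen hdone
    refine ⟨hlen, ?_⟩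
    intro j hj
    rcases hj with hj | hj
    · exact hdone j hj
    · cases hj
  | cons i rest ih =>
    intro done dp hperm hpair hlen hdone
    have hmem : ∀ j, j ∈ done ++ i :: rest → 0 ≤ j ∧ j < (arr.length : Int) := by
      intro j hj
      exact PySem.List.mem_pyRange_one.mp (hperm.mem_iff.mp hj)
    have hnodup : (done ++ i :: rest).Nodup :=
      hperm.symm.nodup (PySem.List.nodup_pyRange_one _ _)
    have hi := hmem i (by simp)
    have hinotdone : i ∉ done := by
      intro h
      have := List.disjoint_of_nodup_append hnodup h
      simp at this
    -- dp lookups agree with jumpA at fuel (rk arr i) on all indices the runs may contain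
    have hc : ∀ j, 0 ≤ j → j < (arr.length : Int) →
        PySem.List.pyGetD arr j 0 < PySem.List.pyGetD arr i 0 →
        PySem.List.pyGetD dp j 0 = jumpA arr d (rk arr i) j := by
      intro j hj0 hj1 hlt
      have hjrk := rk_lt arr hj0 hj1 hlt
      have hjdone : j ∈ done := by
        have hjall : j ∈ done ++ i :: rest :=
          hperm.symm.mem_iff.mp (PySem.List.mem_pyRange_one.mpr ⟨hj0, hj1⟩)
        rcases List.mem_append.mp hjall with h | h
        · exact h
        · rcases List.mem_cons.mp h with rfl | h
          · exact absurd hlt (lt_irrefl _)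
          · have := (List.pairwise_cons.mp hpair).1 j h
            exact absurd hlt (not_lt.mpr this)
      rw [hdone j hjdone]
      exact (jumpA_eq_Jv arr d hj0 hj1 hjrk).symm
    -- the new dp entry is the canonical value
    have hstep : stepB arr d dp i = PySem.List.pySetD dp i (Jv arr d i) := by
      have hfold2 : (lowerRun arr i (-1) d.toNat (i + (-1)) ++ lowerRun arr i 1 d.toNat (i + 1)).foldl
            (fun b j => max b (PySem.List.pyGetD dp j 0)) 0
          = (lowerRun arr i (-1) d.toNat (i + (-1)) ++ lowerRun arr i 1 d.toNat (i + 1)).foldl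
            (fun r j => max r (jumpA arr d (rk arr i) j)) 0 := by
        apply PySem.List.foldl_congr_mem
        intro acc j hj
        rcases List.mem_append.mp hj with h | h
        · obtain ⟨a, b, c⟩ := mem_lowerRun arr i (-1) d.toNat _ j h
          rw [hc j a b c]
        · obtain ⟨a, b, c⟩ := mem_lowerRun arr i 1 d.toNat _ j h
          rw [hc j a b c]
      unfold stepB
      rw [Jv_eq_fold]
      exact congrArg (fun v => PySem.List.pySetD dp i (1 + v)) hfold2
    have hlen' : (stepB arr d dp i).length = arr.length := by
      rw [hstep, PySem.List.length_pySetD, hlen]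
    have hdone' : ∀ j ∈ done ++ [i],
        PySem.List.pyGetD (stepB arr d dp i) j 0 = Jv arr d j := by
      intro j hj
      have hj0 : 0 ≤ j := by
        rcases List.mem_append.mp hj with h | h
        · exact (hmem j (List.mem_append.mpr (Or.inl h))).1
        · simp at h; subst h; exact hi.1
      rw [hstep, pyGetD_pySetD_int _ _ hi.1 (by rw [hlen]; exact hi.2) hj0]
      rcases List.mem_append.mp hj with h | h
      · have hne : j ≠ i := fun he => hinotdone (he ▸ h)
        rw [if_neg hne]
        exact hdone j h
      · simp at h; subst h; simp
    have hperm' : ((done ++ [i]) ++ rest).Perm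
        (PySem.List.pyRange 0 (arr.length : Int) 1) := by
      have : (done ++ [i]) ++ rest = done ++ i :: rest := by simp
      rw [this]; exact hperm
    obtain ⟨hl, hall⟩ := ih (done ++ [i]) (stepB arr d dp i) hperm'
      (List.Pairwise.of_cons hpair) hlen' hdone'
    refine ⟨hl, ?_⟩
    intro j hj
    apply hall
    rcases hj with hj | hj
    · exact Or.inl (List.mem_append.mpr (Or.inl hj))
    · rcases List.mem_cons.mp hj with rfl | hj
      · exact Or.inl (List.mem_append.mpr (Or.inr (by simp)))
      · exact Or.inr hj

-- ===== VERDICT (by name: the statement is the Claim_ definition above) =====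
theorem maxJumps_spec : Claim_equal_maxJumps := by
  intro arr d _ _
  unfold Spec_maxJumps maxJumps maxJumps_alt
  -- A's per-index values are the canonical ones
  have hA : (PySem.List.pyRange 0 (arr.length : Int) 1).map (fun i => jumpA arr d arr.length i)
      = (PySem.List.pyRange 0 (arr.length : Int) 1).map (Jv arr d) := by
    apply List.map_congr_left
    intro i hi
    obtain ⟨h0, h1⟩ := PySem.List.mem_pyRange_one.mp hi
    exact jumpA_eq_Jv arr d h0 h1 (rk_lt_len arr h0 h1)
  -- B's dp table holds the canonical values
  obtain ⟨hlen, hall⟩ := foldB arr d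
    (PySem.List.sorted (PySem.List.pyRange 0 (arr.length : Int) 1)
      (fun k => PySem.List.pyGetD arr k 0)) [] (List.replicate arr.length 1)
    (by simpa using PySem.List.sorted_perm _ _ _)
    (PySem.List.sorted_pairwise _ _)
    (by simp)
    (by intro j h; cases h)
  have hB : (PySem.List.sorted (PySem.List.pyRange 0 (arr.length : Int) 1)
        (fun k => PySem.List.pyGetD arr k 0)).foldl (stepB arr d) (List.replicate arr.length 1)
      = (PySem.List.pyRange 0 (arr.length : Int) 1).map (Jv arr d) := by
    apply List.ext_getElem
    · rw [hlen]; simp [PySem.List.length_pyRange_one]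
    · intro k hk hk'
      have hkn : k < arr.length := by rwa [hlen] at hk
      have hkey : ((k : Int)) ∈ PySem.List.pyRange 0 (arr.length : Int) 1 :=
        PySem.List.mem_pyRange_one.mpr ⟨by exact_mod_cast Nat.zero_le k, by exact_mod_cast hkn⟩
      have hmemsorted : ((k : Int)) ∈ PySem.List.sorted (PySem.List.pyRange 0 (arr.length : Int) 1)
          (fun k => PySem.List.pyGetD arr k 0) := (PySem.List.mem_sorted _ _ _ _).mpr hkey
      have hv := hall (k : Int) (Or.inr hmemsorted)
      rw [PySem.List.pyGetD_natCast] at hv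
      rw [List.getD_eq_getElem _ _ hk] at hv
      rw [hv]
      rw [List.getElem_map]
      congr 1
      rw [PySem.List.getElem_pyRange_one]
      simp
  have hfold : (PySem.List.sorted (PySem.List.pyRange 0 (arr.length : Int) 1)
        (fun k => PySem.List.pyGetD arr k 0)).foldl
      (fun dp i =>
        let cand := lowerRun arr i (-1) d.toNat (i + (-1)) ++ lowerRun arr i 1 d.toNat (i + 1)
        PySem.List.pySetD dp i
          (1 + cand.foldl (fun b j => max b (PySem.List.pyGetD dp j 0)) 0))
      (List.replicate arr.length 1)
      = (PySem.List.sorted (PySem.List.pyRange 0 (arr.length : Int) 1)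
        (fun k => PySem.List.pyGetD arr k 0)).foldl (stepB arr d) (List.replicate arr.length 1) := rfl
  rw [hA, hfold, hB]
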